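-- pv_equiv track=rewrite | github.com/PhyloSofS-Team/thoraxe | thoraxe/subexons/alignment.py | _full_gap_columns
-- ===== SOURCE A (Python) =====
-- def _full_gap_columns(sequences):
--     """
--     Return a boolean list, where True indicates a full gap column.
--     """
--     gaps = [residue == '-' for residue in sequences[0]]
--     n_seqs = len(sequences)
--     if n_seqs > 1:
--         for i in range(1, n_seqs):
--             sequence = sequences[i]
--             for (j, residue) in enumerate(sequence):
--                 if residue != '-':
--                     gaps[j] = False
--     return gaps
-- ===== SOURCE B (Python) =====
-- def _full_gap_columns(sequences):
--     """
--     Return a boolean list, where True indicates a full gap column.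
--     """
--     first = sequences[0]
--     rest = sequences[1:]
--     return [c == '-' and all(s[j] == '-' for s in rest if j < len(s))
--             for j, c in enumerate(first)]
-- ===== Notes on version B (the rewrite author's own statement) =====
-- stated objective: idiomatic
-- what changed: Column-major comprehension with short-circuiting all() over the other rows, instead of seeding a gaps list from sequences[0] and mutating it row by row; all() short-circuits at the first non-gap residue of a column.
import Mathlib
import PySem

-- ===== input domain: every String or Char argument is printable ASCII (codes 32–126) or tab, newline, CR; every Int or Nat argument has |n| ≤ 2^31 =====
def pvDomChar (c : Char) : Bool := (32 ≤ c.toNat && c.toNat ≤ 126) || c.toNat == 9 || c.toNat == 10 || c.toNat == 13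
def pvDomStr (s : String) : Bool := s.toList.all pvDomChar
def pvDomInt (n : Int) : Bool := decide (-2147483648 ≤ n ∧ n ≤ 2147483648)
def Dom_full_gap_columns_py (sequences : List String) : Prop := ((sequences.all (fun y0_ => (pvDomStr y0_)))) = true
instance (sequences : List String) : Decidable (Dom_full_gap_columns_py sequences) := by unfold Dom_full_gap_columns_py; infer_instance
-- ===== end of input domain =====

-- B rewrites A column-major: an all()-style comprehension over the columns of the first row, no mutated gaps list (objective: idiomatic).

-- ===== PORT A =====
-- Port of A. On [] Python raises IndexError (sequences[0]); on a non-gap residue at an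
-- index ≥ len(sequences[0]) Python raises IndexError on `gaps[j] = False` while List.set
-- is a no-op there — both kinds of input are excluded by Pre_full_gap_columns_py.
def full_gap_columns_py (sequences : List String) : List Bool :=
  match sequences with
  | [] => []
  | s0 :: rest =>
    let gaps := s0.toList.map (fun residue => residue == '-')
    rest.foldl (fun gaps sequence =>
      (PySem.List.enumerate sequence.toList).foldl
        (fun gaps jr => if jr.2 ≠ '-' then gaps.set jr.1.toNat false else gaps) gaps) gaps

-- ===== PORT B =====
-- Port of B: one pass over enumerate(first); each column checked across the other rows
-- with `all`, skipping rows shorter than j (the `if j < len(s)` guard = none ↦ true).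
def full_gap_columns_py_alt (sequences : List String) : List Bool :=
  match sequences with
  | [] => []  -- sequences[0] raises IndexError in Python; excluded by Pre_
  | s0 :: rest =>
    (PySem.List.enumerate s0.toList).map (fun jc =>
      (jc.2 == '-') && rest.all (fun s =>
        match s.toList[jc.1.toNat]? with
        | some c => c == '-'
        | none => true))

-- ===== PRECONDITION & SPEC =====
-- Exactly the inputs on which Python A returns: sequences is nonempty, and no sequence has
-- a non-gap residue at an index ≥ len(sequences[0]) (there A raises IndexError).
def Pre_full_gap_columns_py (sequences : List String) : Prop :=
  sequences ≠ [] ∧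
  (sequences.all (fun s =>
    (s.toList.drop (sequences.headD "").toList.length).all (fun c => c == '-'))) = true
instance (sequences : List String) : Decidable (Pre_full_gap_columns_py sequences) := by
  unfold Pre_full_gap_columns_py; infer_instance

def pvWitness_full_gap_columns_py : List String := ["a-", "-a", "--"]

def Spec_full_gap_columns_py (sequences : List String) (out : List Bool) : Prop :=
  out = full_gap_columns_py_alt sequences
instance (sequences : List String) (out : List Bool) : Decidable (Spec_full_gap_columns_py sequences out) := by
  unfold Spec_full_gap_columns_py; infer_instance

-- ===== CLAIM (what is proved, stated in full; the proofs are below) =====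
def Claim_equal_full_gap_columns_py : Prop := ∀ (sequences : List String), Dom_full_gap_columns_py sequences → Pre_full_gap_columns_py sequences → Spec_full_gap_columns_py sequences (full_gap_columns_py sequences)


-- ===== LEMMAS AND PROOFS =====

-- the inner row loop of A
def pvRowStep (gaps : List Bool) (jr : Int × Char) : List Bool :=
  if jr.2 ≠ '-' then gaps.set jr.1.toNat false else gaps

-- what each row contributes to column k (true if out of range: Python's guard / A's no-op)
def pvColOk (l : List Char) (k : Nat) : Bool :=
  match l[k]? with
  | some c => c == '-'
  | none => true

theorem pvMap_and_true (o : Option Bool) : o.map (fun b => b && true) = o := by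
  cases o <;> simp

theorem pvColOk_nil (k : Nat) : pvColOk [] k = true := by simp [pvColOk]

theorem pvColOk_cons_succ (c : Char) (l : List Char) (k : Nat) (h : 0 < k) :
    pvColOk (c :: l) k = pvColOk l (k - 1) := by
  unfold pvColOk
  rw [List.getElem?_cons]
  rw [if_neg (by omega : ¬ k = 0)]

theorem pvRow_getElem? (l : List Char) (s : Nat) (g : List Bool) (k : Nat) :
    ((PySem.List.enumerate l (s : Int)).foldl pvRowStep g)[k]? =
      (if s ≤ k then g[k]?.map (fun b => b && pvColOk l (k - s)) else g[k]?) := by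
  induction l generalizing s g with
  | nil =>
    rw [PySem.List.enumerate_nil, List.foldl_nil]
    split
    · rw [pvColOk_nil, pvMap_and_true]
    · rfl
  | cons c l ih =>
    rw [PySem.List.enumerate_cons, List.foldl_cons]
    have hcast : ((s : Int) + 1) = ((s + 1 : Nat) : Int) := by push_cast; ring
    rw [hcast, ih]
    have hstep : pvRowStep g ((s : Int), c) = if c ≠ '-' then g.set s false else g := by
      simp [pvRowStep]
    rw [hstep]
    rcases Nat.lt_trichotomy k s with hk | hk | hk
    · -- k < s : nothing touches position k
      rw [if_neg (by omega : ¬ s + 1 ≤ k), if_neg (by omega : ¬ s ≤ k)]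
      by_cases hc : c = '-'
      · simp [hc]
      · rw [if_pos hc, List.getElem?_set, if_neg (by omega : ¬ s = k)]
    · -- k = s : this is the column the head residue decides
      subst hk
      rw [if_neg (by omega : ¬ k + 1 ≤ k), if_pos (le_refl k)]
      have hcol : pvColOk (c :: l) (k - k) = (c == '-') := by
        simp [pvColOk]
      rw [hcol]
      by_cases hc : c = '-'
      · rw [if_neg (by simp [hc])]
        subst hc; simp
      · rw [if_pos hc, List.getElem?_set, if_pos rfl]
        have hcb : (c == '-') = false := by simpa using hc
        rw [hcb]
        by_cases hlen : k < g.length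
        · rw [if_pos hlen, List.getElem?_eq_getElem hlen]
          simp
        · rw [if_neg hlen, List.getElem?_eq_none (by omega)]
          simp
    · -- s < k : position k is decided inside the tail
      rw [if_pos (by omega : s + 1 ≤ k), if_pos (by omega : s ≤ k)]
      have hg : (if c ≠ '-' then g.set s false else g)[k]? = g[k]? := by
        by_cases hc : c = '-'
        · simp [hc]
        · rw [if_pos hc, List.getElem?_set, if_neg (by omega : ¬ s = k)]
      rw [hg]
      rw [pvColOk_cons_succ c l (k - s) (by omega)]
      rw [show k - s - 1 = k - (s + 1) from by omega]

theorem pvRow_getElem?_zero (l : List Char) (g : List Bool) (k : Nat) :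
    ((PySem.List.enumerate l).foldl pvRowStep g)[k]? = g[k]?.map (fun b => b && pvColOk l k) := by
  have h := pvRow_getElem? l 0 g k
  rw [show ((0 : Nat) : Int) = (0 : Int) from rfl] at h
  rw [h, if_pos (Nat.zero_le k), Nat.sub_zero]

theorem pvFold_getElem? (rest : List String) (g : List Bool) (k : Nat) :
    (rest.foldl (fun gaps sequence =>
        (PySem.List.enumerate sequence.toList).foldl pvRowStep gaps) g)[k]? =
      g[k]?.map (fun b => b && rest.all (fun s => pvColOk s.toList k)) := by
  induction rest generalizing g with
  | nil => rw [List.foldl_nil, List.all_nil, pvMap_and_true]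
  | cons s rest ih =>
    rw [List.foldl_cons, ih, pvRow_getElem?_zero]
    cases g[k]? <;> simp [Bool.and_assoc]

-- ===== VERDICT (by name: the statement is the Claim_ definition above) =====
theorem full_gap_columns_py_spec : Claim_equal_full_gap_columns_py := by
  intro sequences _ _
  unfold Spec_full_gap_columns_py
  cases sequences with
  | nil => rfl
  | cons s0 rest =>
    simp only [full_gap_columns_py, full_gap_columns_py_alt]
    apply List.ext_getElem?
    intro k
    rw [show (fun (gaps : List Bool) (jr : Int × Char) =>
          if jr.2 ≠ '-' then gaps.set jr.1.toNat false else gaps) = pvRowStep from rfl]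
    rw [pvFold_getElem? rest (s0.toList.map (fun residue => residue == '-')) k]
    rw [List.getElem?_map, List.getElem?_map, PySem.List.getElem?_enumerate]
    cases hc : s0.toList[k]? with
    | none => simp
    | some c =>
      simp only [Option.map_some]
      congr 1
      rw [show ((0 : Int) + (k : Int)).toNat = k from by omega]
      congr 1
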